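-- pv_equiv track=rewrite | github.com/seriousboi/Shuffle | calculus.py | get_absolute_matrix
-- ===== SOURCE A (Python) =====
-- def matrix_sum(m1,m2):
--     dimension= len(m1)
--     m3= []
--     for i in range(dimension):
--         m3= m3 + [[]]
--         for j in range(dimension):
--             m3[i]= m3[i] + [m1[i][j]+m2[i][j]]
--     return m3
--
-- def matrix_scal(m,s):
--     dimension= len(m)
--     new_m= []
--     for i in range(dimension):
--         new_m= new_m + [[]]
--         for j in range(dimension):
--             new_m[i]= new_m[i] + [m[i][j]*s]
--     return new_m
--
-- def get_absolute_matrix(shuffle,dim):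
--     absolute_matrix= []
--     for i in range(dim):
--         absolute_matrix= absolute_matrix + [[]]
--         for j in range(dim):
--             absolute_matrix[i]= absolute_matrix[i] + [0]
--
--     for oc in shuffle:
--         absolute_matrix= matrix_sum(absolute_matrix,matrix_scal(oc[0],oc[1]))
--     return absolute_matrix
-- ===== SOURCE B (Python) =====
-- def get_absolute_matrix(shuffle, dim):
--     result = []
--     for i in range(dim):
--         row = []
--         for j in range(dim):
--             total = 0
--             for oc in shuffle:
--                 total += oc[0][i][j] * oc[1]
--             row.append(total)
--         result.append(row)
--     return result
-- ===== Notes on version B (the rewrite author's own statement) =====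
-- stated objective: simpler
-- what changed: computes each output cell once as a direct sum over shuffle in a double index loop, dropping the matrix_sum/matrix_scal helpers and the repeated full-matrix rebuild per occurrence
import Mathlib
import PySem

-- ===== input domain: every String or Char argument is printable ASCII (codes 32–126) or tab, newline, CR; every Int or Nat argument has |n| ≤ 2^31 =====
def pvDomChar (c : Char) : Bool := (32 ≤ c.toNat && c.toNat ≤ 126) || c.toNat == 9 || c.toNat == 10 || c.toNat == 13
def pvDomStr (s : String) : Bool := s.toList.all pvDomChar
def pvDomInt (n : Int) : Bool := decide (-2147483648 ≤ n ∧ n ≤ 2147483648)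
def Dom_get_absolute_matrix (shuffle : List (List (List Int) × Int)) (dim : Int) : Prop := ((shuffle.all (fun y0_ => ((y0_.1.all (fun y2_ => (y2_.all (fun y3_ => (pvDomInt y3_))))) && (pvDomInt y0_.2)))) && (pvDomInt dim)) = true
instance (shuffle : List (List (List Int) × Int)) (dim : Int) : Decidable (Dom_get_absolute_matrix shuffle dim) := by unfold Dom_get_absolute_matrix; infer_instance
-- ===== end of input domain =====

-- B computes each output cell once as a direct sum over the shuffle list (simpler
-- decomposition); A rebuilds the whole matrix per occurrence via matrix_sum/matrix_scal.

-- ===== PORT A =====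
-- literal port of matrix_sum; in-range index reads become getD (Pre_ keeps them in range)
def matrix_sum (m1 m2 : List (List Int)) : List (List Int) :=
  let dimension := m1.length
  (List.range dimension).foldl (fun m3 i =>
    (List.range dimension).foldl
      (fun m j => m.set i ((m.getD i []) ++ [(m1.getD i []).getD j 0 + (m2.getD i []).getD j 0]))
      (m3 ++ [[]])) []

-- literal port of matrix_scal
def matrix_scal (m : List (List Int)) (s : Int) : List (List Int) :=
  let dimension := m.length
  (List.range dimension).foldl (fun nm i =>
    (List.range dimension).foldl
      (fun nm' j => nm'.set i ((nm'.getD i []) ++ [(m.getD i []).getD j 0 * s]))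
      (nm ++ [[]])) []

-- range(dim) on an Int dim is List.range dim.toNat (empty for dim ≤ 0, exact otherwise)
def get_absolute_matrix (shuffle : List (List (List Int) × Int)) (dim : Int) : List (List Int) :=
  let init := (List.range dim.toNat).foldl (fun am i =>
    (List.range dim.toNat).foldl
      (fun a _j => a.set i ((a.getD i []) ++ [(0 : Int)]))
      (am ++ [[]])) []
  shuffle.foldl (fun am oc => matrix_sum am (matrix_scal oc.1 oc.2)) init

-- ===== PORT B =====
def get_absolute_matrix_alt (shuffle : List (List (List Int) × Int)) (dim : Int) : List (List Int) :=
  (List.range dim.toNat).map (fun i =>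
    (List.range dim.toNat).map (fun j =>
      shuffle.foldl (fun total oc => total + (oc.1.getD i []).getD j 0 * oc.2) 0))

-- ===== PRECONDITION & SPEC =====
-- Pre_ is exactly A's non-raising domain: each occurrence matrix must be a square of
-- size at least dim (matrix_scal scales the full matrix, matrix_sum reads its dim×dim corner).
def Pre_get_absolute_matrix (shuffle : List (List (List Int) × Int)) (dim : Int) : Prop :=
  ∀ oc ∈ shuffle, dim ≤ (oc.1.length : Int) ∧ ∀ row ∈ oc.1, oc.1.length ≤ row.length
instance (shuffle : List (List (List Int) × Int)) (dim : Int) : Decidable (Pre_get_absolute_matrix shuffle dim) := by unfold Pre_get_absolute_matrix; infer_instance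

def pvWitness_get_absolute_matrix : (List (List (List Int) × Int)) × Int :=
  ([([[1, 2], [3, 4]], 2), ([[5, 6], [7, 8]], -1)], 2)

def Spec_get_absolute_matrix (shuffle : List (List (List Int) × Int)) (dim : Int) (out : List (List Int)) : Prop := out = get_absolute_matrix_alt shuffle dim
instance (shuffle : List (List (List Int) × Int)) (dim : Int) (out : List (List Int)) : Decidable (Spec_get_absolute_matrix shuffle dim out) := by unfold Spec_get_absolute_matrix; infer_instance

-- ===== CLAIM (what is proved, stated in full; the proofs are below) =====
def Claim_equal_get_absolute_matrix : Prop := ∀ (shuffle : List (List (List Int) × Int)) (dim : Int), Dom_get_absolute_matrix shuffle dim → Pre_get_absolute_matrix shuffle dim → Spec_get_absolute_matrix shuffle dim (get_absolute_matrix shuffle dim)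

-- ===== LEMMAS AND PROOFS =====

-- appending one entry to row i when i is the index of the last row
lemma pv_inner (g : Nat → Int) (js : List Nat) (pre : List (List Int)) (acc : List Int) :
    js.foldl (fun m j => m.set pre.length ((m.getD pre.length []) ++ [g j])) (pre ++ [acc])
      = pre ++ [acc ++ js.map g] := by
  induction js generalizing acc with
  | nil => simp
  | cons j js ih =>
    have hget : (pre ++ [acc]).getD pre.length [] = acc := by
      simp [List.getD]
    have hset : (pre ++ [acc]).set pre.length (acc ++ [g j]) = pre ++ [acc ++ [g j]] := by
      rw [List.set_append_right _ _ (le_refl _)]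
      simp
    simp only [List.foldl_cons, hget, hset, ih]
    simp

-- the row-building double loop is a double map
lemma pv_build (f : Nat → Nat → Int) (cols : List Nat) (n : Nat) :
    (List.range n).foldl (fun m3 i =>
        cols.foldl (fun m j => m.set i ((m.getD i []) ++ [f i j])) (m3 ++ [[]])) []
      = (List.range n).map (fun i => cols.map (f i)) := by
  induction n with
  | zero => simp
  | succ n ih =>
    rw [List.range_succ, List.foldl_append, ih]
    simp only [List.foldl_cons, List.foldl_nil, List.map_append, List.map_cons, List.map_nil]
    have := pv_inner (f n) cols ((List.range n).map (fun i => cols.map (f i))) []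
    simpa using this

lemma matrix_sum_eq (m1 m2 : List (List Int)) :
    matrix_sum m1 m2 = (List.range m1.length).map (fun i => (List.range m1.length).map
      (fun j => (m1.getD i []).getD j 0 + (m2.getD i []).getD j 0)) := by
  unfold matrix_sum; exact pv_build _ _ _

lemma matrix_scal_eq (m : List (List Int)) (s : Int) :
    matrix_scal m s = (List.range m.length).map (fun i => (List.range m.length).map
      (fun j => (m.getD i []).getD j 0 * s)) := by
  unfold matrix_scal; exact pv_build _ _ _

lemma getD_map_range {α : Type} (g : Nat → α) (n i : Nat) (d : α) (h : i < n) :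
    ((List.range n).map g).getD i d = g i := by
  simp [List.getD, h]

-- main invariant: folding matrix_sum/matrix_scal over the shuffle accumulates each cell
lemma pv_main (d : Nat) (shuffle : List (List (List Int) × Int))
    (hs : ∀ oc ∈ shuffle, d ≤ oc.1.length) (F : Nat → Nat → Int) :
    shuffle.foldl (fun am oc => matrix_sum am (matrix_scal oc.1 oc.2))
        ((List.range d).map fun i => (List.range d).map fun j => F i j)
      = (List.range d).map fun i => (List.range d).map fun j =>
          shuffle.foldl (fun t oc => t + (oc.1.getD i []).getD j 0 * oc.2) (F i j) := by
  induction shuffle generalizing F with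
  | nil => simp
  | cons oc rest ih =>
    have hoc : d ≤ oc.1.length := hs oc (by simp)
    have hstep : matrix_sum ((List.range d).map fun i => (List.range d).map fun j => F i j)
          (matrix_scal oc.1 oc.2)
        = (List.range d).map fun i => (List.range d).map fun j =>
            F i j + (oc.1.getD i []).getD j 0 * oc.2 := by
      rw [matrix_sum_eq, matrix_scal_eq]
      simp only [List.length_map, List.length_range]
      apply List.map_congr_left
      intro i hi
      have hi' : i < d := List.mem_range.mp hi
      apply List.map_congr_left
      intro j hj
      have hj' : j < d := List.mem_range.mp hj
      rw [getD_map_range _ _ _ _ hi', getD_map_range _ _ _ _ hj',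
          getD_map_range _ _ _ _ (lt_of_lt_of_le hi' hoc),
          getD_map_range _ _ _ _ (lt_of_lt_of_le hj' hoc)]
    simp only [List.foldl_cons, hstep]
    exact ih (fun o ho => hs o (by simp [ho])) _

-- ===== VERDICT (by name: the statement is the Claim_ definition above) =====
theorem get_absolute_matrix_spec : Claim_equal_get_absolute_matrix := by
  intro shuffle dim _ hpre
  unfold Spec_get_absolute_matrix get_absolute_matrix get_absolute_matrix_alt
  have hinit : (List.range dim.toNat).foldl (fun am i =>
        (List.range dim.toNat).foldl
          (fun a _j => a.set i ((a.getD i []) ++ [(0 : Int)]))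
          (am ++ [[]])) []
      = (List.range dim.toNat).map fun i => (List.range dim.toNat).map fun _ => (0 : Int) :=
    pv_build (fun _ _ => 0) _ _
  rw [hinit]
  exact pv_main dim.toNat shuffle
    (fun oc ho => by have := (hpre oc ho).1; omega) (fun _ _ => 0)
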